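-- pv_equiv track=rewrite | github.com/dipikakhullar/Data-Structures-Algorithms | dropbox.py | update_word_map
-- ===== SOURCE A (Python) =====
-- def update_word_map(words, word_map, score = 0):
-- 	local_word = ""
-- 	for i in range(len(words)):
-- 		character = words[i]
-- 		if character == " ":
-- 			if local_word in word_map:
-- 				word_map[local_word] += score
-- 			else:
-- 				word_map[local_word] = score
-- 			local_word = ""
--
-- 		else:
-- 			local_word += character
-- 	if local_word in word_map:
-- 		word_map[local_word] += score
-- 	else:
-- 		word_map[local_word] = score
-- 	return word_map
-- ===== SOURCE B (Python) =====
-- def update_word_map(words, word_map, score=0):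
--     for w in words.split(" "):
--         word_map[w] = word_map.get(w, 0) + score
--     return word_map
-- ===== Notes on version B (the rewrite author's own statement) =====
-- stated objective: idiomatic
-- what changed: Replaced A's manual per-character scanner with its membership-branch updates by tokenizing once with words.split(" ") and a single get-with-default dict update per token.
import Mathlib
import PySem

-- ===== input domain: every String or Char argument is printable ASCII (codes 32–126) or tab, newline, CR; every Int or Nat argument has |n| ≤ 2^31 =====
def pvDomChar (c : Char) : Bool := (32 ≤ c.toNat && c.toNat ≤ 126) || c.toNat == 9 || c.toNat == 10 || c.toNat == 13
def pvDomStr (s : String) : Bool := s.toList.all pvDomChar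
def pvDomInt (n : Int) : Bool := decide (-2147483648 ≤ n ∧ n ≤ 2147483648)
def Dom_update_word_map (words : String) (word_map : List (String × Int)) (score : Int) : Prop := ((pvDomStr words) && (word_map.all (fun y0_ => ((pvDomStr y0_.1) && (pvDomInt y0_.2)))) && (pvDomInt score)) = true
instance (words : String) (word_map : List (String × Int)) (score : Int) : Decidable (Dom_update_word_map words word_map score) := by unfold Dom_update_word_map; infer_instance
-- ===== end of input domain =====

-- B replaces A's manual character scanner + membership branches by words.split(" ") and a
-- get-with-default update (idiomatic; same dict mutation observed by the caller in Python).

-- ===== PORT A =====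
-- the 'if local_word in word_map: += score else: = score' block of A
def pvFlushA (d : PySem.Dict String Int) (k : String) (score : Int) : PySem.Dict String Int :=
  if d.contains k then d.insert k (d.getD k 0 + score) else d.insert k score

def update_word_map (words : String) (word_map : List (String × Int)) (score : Int) : List (String × Int) :=
  -- for i in range(len(words)): character = words[i]; …  (local_word kept as a char list, += appends)
  let st := words.toList.foldl
    (fun (st : List Char × PySem.Dict String Int) character =>
      if character == ' ' then ([], pvFlushA st.2 (String.ofList st.1) score)
      else (st.1 ++ [character], st.2))
    ([], PySem.Dict.mk word_map)
  (pvFlushA st.2 (String.ofList st.1) score).items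

-- ===== PORT B =====
-- word_map[w] = word_map.get(w, 0) + score
def pvAdd (score : Int) (d : PySem.Dict String Int) (w : String) : PySem.Dict String Int :=
  d.insert w (d.getD w 0 + score)

def update_word_map_alt (words : String) (word_map : List (String × Int)) (score : Int) : List (String × Int) :=
  -- words.split(" "): sep is the nonempty literal " ", so split? never returns none; .getD [] makes that total
  (((PySem.Str.split? words " ").getD []).foldl (pvAdd score) (PySem.Dict.mk word_map)).items

-- ===== PRECONDITION & SPEC =====
def Spec_update_word_map (words : String) (word_map : List (String × Int)) (score : Int) (out : List (String × Int)) : Prop := out = update_word_map_alt words word_map score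
instance (words : String) (word_map : List (String × Int)) (score : Int) (out : List (String × Int)) : Decidable (Spec_update_word_map words word_map score out) := by unfold Spec_update_word_map; infer_instance

-- ===== CLAIM (what is proved, stated in full; the proofs are below) =====
def Claim_equal_update_word_map : Prop := ∀ (words : String) (word_map : List (String × Int)) (score : Int), Dom_update_word_map words word_map score → Spec_update_word_map words word_map score (update_word_map words word_map score)

-- ===== LEMMAS AND PROOFS =====

-- clean structural tokenizer: the tokens of cs split on ' ', with cur the word read so far
def pvTok (cur : List Char) : List Char → List (List Char)
  | [] => [cur]
  | c :: cs => if c = ' ' then cur :: pvTok [] cs else pvTok (cur ++ [c]) cs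

theorem pvGo_spec (fuel : Nat) : ∀ (cs cur : List Char) (acc : List (List Char)),
    cs.length < fuel →
    PySem.Chars.splitOn.go [' '] fuel cs cur acc = acc.reverse ++ pvTok cur.reverse cs := by
  induction fuel with
  | zero => intro cs cur acc h; omega
  | succ n ih =>
    intro cs cur acc h
    cases cs with
    | nil => simp [PySem.Chars.splitOn.go, pvTok]
    | cons c rest =>
      by_cases hc : c = ' '
      · subst hc
        have : PySem.Chars.splitOn.go [' '] (n+1) (' '::rest) cur acc
            = PySem.Chars.splitOn.go [' '] n rest [] (cur.reverse :: acc) := by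
          simp [PySem.Chars.splitOn.go]
        rw [this, ih rest [] (cur.reverse :: acc) (by simpa using Nat.lt_of_succ_lt_succ h)]
        simp [pvTok]
      · have hpre : List.isPrefixOf [' '] (c :: rest) = false := by
          simp [List.isPrefixOf]; exact fun h => absurd h.symm hc
        have : PySem.Chars.splitOn.go [' '] (n+1) (c::rest) cur acc
            = PySem.Chars.splitOn.go [' '] n rest (c :: cur) acc := by
          simp [PySem.Chars.splitOn.go, hpre]
        rw [this, ih rest (c :: cur) acc (by simpa using Nat.lt_of_succ_lt_succ h)]
        simp [pvTok, hc]

theorem pvSplitOn_space (cs : List Char) : PySem.Chars.splitOn cs [' '] = pvTok [] cs := by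
  have := pvGo_spec (cs.length + 1) cs [] [] (by omega)
  simpa [PySem.Chars.splitOn] using this

theorem pvFlush_eq_add (d : PySem.Dict String Int) (k : String) (score : Int) :
    pvFlushA d k score = pvAdd score d k := by
  unfold pvFlushA pvAdd
  by_cases h : d.contains k = true
  · simp [h]
  · have hget : d.get? k = none := by
      unfold PySem.Dict.contains at h
      unfold PySem.Dict.get?
      rw [List.find?_eq_none.mpr]
      · rfl
      · intro p hp hpk
        exact h (List.any_eq_true.mpr ⟨p, hp, hpk⟩)
    simp [h, PySem.Dict.getD, hget]

theorem pvMain (score : Int) : ∀ (cs cur : List Char) (d : PySem.Dict String Int),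
    (pvFlushA
      (cs.foldl
        (fun (st : List Char × PySem.Dict String Int) character =>
          if character == ' ' then ([], pvFlushA st.2 (String.ofList st.1) score)
          else (st.1 ++ [character], st.2)) (cur, d)).2
      (String.ofList (cs.foldl
        (fun (st : List Char × PySem.Dict String Int) character =>
          if character == ' ' then ([], pvFlushA st.2 (String.ofList st.1) score)
          else (st.1 ++ [character], st.2)) (cur, d)).1) score)
    = (pvTok cur cs).foldl (fun d w => pvAdd score d (String.ofList w)) d := by
  intro cs
  induction cs with
  | nil => intro cur d; simp [pvTok, pvFlush_eq_add]
  | cons c rest ih =>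
    intro cur d
    by_cases hc : c = ' '
    · subst hc
      rw [List.foldl_cons]
      rw [show (if ((' ' == ' ') = true) then
            ([], pvFlushA (cur, d).2 (String.ofList (cur, d).1) score)
          else ((cur, d).1 ++ [' '], (cur, d).2))
          = (([] : List Char), pvFlushA d (String.ofList cur) score) from rfl]
      rw [ih [] (pvFlushA d (String.ofList cur) score)]
      simp [pvTok, pvFlush_eq_add]
    · rw [List.foldl_cons]
      rw [if_neg (by simp [hc] : ¬ ((c == ' ') = true))]
      rw [show ((cur, d).1 ++ [c], (cur, d).2) = (cur ++ [c], d) from rfl]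
      rw [ih (cur ++ [c]) d]
      simp [pvTok, hc]

-- ===== VERDICT (by name: the statement is the Claim_ definition above) =====
theorem update_word_map_spec : Claim_equal_update_word_map := by
  intro words word_map score _
  unfold Spec_update_word_map update_word_map update_word_map_alt
  have hsplit : PySem.Str.split? words " "
      = some ((pvTok [] words.toList).map String.ofList) := by
    simp [PySem.Str.split?, PySem.Chars.split?, pvSplitOn_space]
  rw [hsplit]
  simp only [Option.getD_some, List.foldl_map]
  rw [← pvMain score words.toList [] (PySem.Dict.mk word_map)]
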